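-- pv_equiv track=rewrite | github.com/kaestro/algorithms_v3 | random_practices/February/Week2nd/LeetCode - 1781.py | advanced_beautySum
-- ===== SOURCE A (Python) =====
-- from collections import Counter
--
-- def advanced_beautySum(input_str: str) -> int:
--     total_beauty = 0
--     for i in range(len(input_str)):
--         frequency = Counter()
--         for j in range(i, len(input_str)):
--             frequency[input_str[j]] += 1
--             total_beauty += max(frequency.values()) - min(frequency.values())
--     return total_beauty
-- ===== SOURCE B (Python) =====
-- def _prefix_counts(s, c):
--     # pref[k] = number of occurrences of c in s[:k]
--     acc = [0]
--     for ch in s: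
--         acc.append(acc[-1] + (1 if ch == c else 0))
--     return acc
--
-- def advanced_beautySum(input_str: str) -> int:
--     n = len(input_str)
--     alphabet = list(dict.fromkeys(input_str))           # distinct chars, first occurrence order
--     prefs = {c: _prefix_counts(input_str, c) for c in alphabet}
--     total = 0
--     for i in range(n):
--         for j in range(i + 1, n + 1):
--             counts = [prefs[c][j] - prefs[c][i] for c in alphabet if prefs[c][j] > prefs[c][i]]
--             total += max(counts) - min(counts)
--     return total
-- ===== Notes on version B (the rewrite author's own statement) =====
-- stated objective: alternative
-- what changed: B drops A's incrementally updated Counter with per-step max/min over its values and instead precomputes one prefix-count table per distinct character, reading each substring's character frequencies as prefix-count differences.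
import Mathlib
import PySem

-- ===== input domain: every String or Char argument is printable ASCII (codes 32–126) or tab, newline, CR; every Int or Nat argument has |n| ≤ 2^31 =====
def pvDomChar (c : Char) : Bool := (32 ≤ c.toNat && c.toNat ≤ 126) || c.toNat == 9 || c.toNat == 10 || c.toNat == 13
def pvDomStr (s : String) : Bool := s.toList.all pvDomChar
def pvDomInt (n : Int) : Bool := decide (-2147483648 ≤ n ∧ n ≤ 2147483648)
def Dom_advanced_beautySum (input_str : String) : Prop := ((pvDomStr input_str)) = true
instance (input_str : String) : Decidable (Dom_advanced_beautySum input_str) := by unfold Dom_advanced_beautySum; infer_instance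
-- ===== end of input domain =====

-- B replaces A's incremental Counter with per-character prefix-count tables looked up per substring (alternative algorithm, similar cost).

-- ===== PORT A =====
-- max(frequency.values()) / min(...) are only taken after an insertion, so values is never empty
-- and the .getD 0 default is unreachable (Python's ValueError on empty max never fires).
def advanced_beautySum (input_str : String) : Int :=
  let chars := input_str.toList
  let n : Int := (chars.length : Int)
  (PySem.List.pyRange 0 n 1).foldl (fun total_beauty i =>
    ((PySem.List.pyRange i n 1).foldl
      (fun (st : PySem.Dict Char Int × Int) j =>
        let frequency := st.1.modify (PySem.List.pyGetD chars j ' ') 0 (· + 1)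
        (frequency,
          st.2 + ((PySem.List.max? frequency.values (fun v => v)).getD 0
                  - (PySem.List.min? frequency.values (fun v => v)).getD 0)))
      (PySem.Dict.empty, total_beauty)).2) 0

-- ===== PORT B =====
-- helper _prefix_counts from Source B; acc[-1] is PySem.List.pyGetD acc (-1)
def prefixCounts (s : List Char) (c : Char) : List Int :=
  s.foldl (fun acc ch => acc ++ [PySem.List.pyGetD acc (-1) 0 + (if ch == c then 1 else 0)]) [0]

def advanced_beautySum_alt (input_str : String) : Int :=
  let chars := input_str.toList
  let n : Int := (chars.length : Int)
  let alphabet := PySem.List.dedup chars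
  let prefs : PySem.Dict Char (List Int) :=
    alphabet.foldl (fun d c => d.insert c (prefixCounts chars c)) PySem.Dict.empty
  (PySem.List.pyRange 0 n 1).foldl (fun total i =>
    (PySem.List.pyRange (i + 1) (n + 1) 1).foldl (fun total j =>
      let counts :=
        (alphabet.filter (fun c =>
            PySem.List.pyGetD (prefs.getD c []) i 0 < PySem.List.pyGetD (prefs.getD c []) j 0)).map
          (fun c =>
            PySem.List.pyGetD (prefs.getD c []) j 0 - PySem.List.pyGetD (prefs.getD c []) i 0)
      total + ((PySem.List.max? counts (fun v => v)).getD 0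
               - (PySem.List.min? counts (fun v => v)).getD 0)) total) 0

-- ===== PRECONDITION & SPEC =====
def Spec_advanced_beautySum (input_str : String) (out : Int) : Prop := out = advanced_beautySum_alt input_str
instance (input_str : String) (out : Int) : Decidable (Spec_advanced_beautySum input_str out) := by unfold Spec_advanced_beautySum; infer_instance

-- ===== CLAIM (what is proved, stated in full; the proofs are below) =====
def Claim_equal_advanced_beautySum : Prop := ∀ (input_str : String), Dom_advanced_beautySum input_str → Spec_advanced_beautySum input_str (advanced_beautySum input_str)

-- ===== LEMMAS AND PROOFS =====
lemma maxD_congr (l1 l2 : List Int) (hm : ∀ x, x ∈ l1 ↔ x ∈ l2) (hne : l1 ≠ []) :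
    (PySem.List.max? l1 (fun v => v)).getD 0 = (PySem.List.max? l2 (fun v => v)).getD 0 := by
  have hne2 : l2 ≠ [] := by
    cases l1 with
    | nil => exact absurd rfl hne
    | cons a t => exact List.ne_nil_of_mem ((hm a).1 (List.mem_cons_self))
  obtain ⟨m1, h1⟩ : ∃ m, PySem.List.max? l1 (fun v => v) = some m := by
    cases h : PySem.List.max? l1 (fun v => v) with
    | none => exact absurd ((PySem.List.max?_eq_none_iff l1 _).mp h) hne
    | some m => exact ⟨m, rfl⟩
  obtain ⟨m2, h2⟩ : ∃ m, PySem.List.max? l2 (fun v => v) = some m := by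
    cases h : PySem.List.max? l2 (fun v => v) with
    | none => exact absurd ((PySem.List.max?_eq_none_iff l2 _).mp h) hne2
    | some m => exact ⟨m, rfl⟩
  rw [h1, h2]
  simp only [Option.getD_some]
  exact le_antisymm (PySem.List.max?_isMax h2 m1 ((hm m1).1 (PySem.List.max?_mem h1)))
                    (PySem.List.max?_isMax h1 m2 ((hm m2).2 (PySem.List.max?_mem h2)))
lemma minD_congr (l1 l2 : List Int) (hm : ∀ x, x ∈ l1 ↔ x ∈ l2) (hne : l1 ≠ []) :
    (PySem.List.min? l1 (fun v => v)).getD 0 = (PySem.List.min? l2 (fun v => v)).getD 0 := by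
  have hne2 : l2 ≠ [] := by
    cases l1 with
    | nil => exact absurd rfl hne
    | cons a t => exact List.ne_nil_of_mem ((hm a).1 (List.mem_cons_self))
  obtain ⟨m1, h1⟩ : ∃ m, PySem.List.min? l1 (fun v => v) = some m := by
    cases h : PySem.List.min? l1 (fun v => v) with
    | none => exact absurd ((PySem.List.min?_eq_none_iff l1 _).mp h) hne
    | some m => exact ⟨m, rfl⟩
  obtain ⟨m2, h2⟩ : ∃ m, PySem.List.min? l2 (fun v => v) = some m := by
    cases h : PySem.List.min? l2 (fun v => v) with
    | none => exact absurd ((PySem.List.min?_eq_none_iff l2 _).mp h) hne2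
    | some m => exact ⟨m, rfl⟩
  rw [h1, h2]
  simp only [Option.getD_some]
  exact le_antisymm (PySem.List.min?_isMin h1 m2 ((hm m2).2 (PySem.List.min?_mem h2)))
                    (PySem.List.min?_isMin h2 m1 ((hm m1).1 (PySem.List.min?_mem h1)))
lemma prefixCounts_eq (s : List Char) (c : Char) :
    prefixCounts s c = (List.range (s.length + 1)).map (fun k => ((s.take k).count c : Int)) := by
  induction s using List.reverseRecOn with
  | nil => simp [prefixCounts, List.range_succ]
  | append_singleton l x ih =>
    have hstep : prefixCounts (l ++ [x]) c
        = prefixCounts l c ++ [PySem.List.pyGetD (prefixCounts l c) (-1) 0 + (if x == c then 1 else 0)] := by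
      simp [prefixCounts, List.foldl_append]
    rw [hstep, ih]
    have hrng : List.range (l.length + 1) = List.range l.length ++ [l.length] := List.range_succ
    have hlast : PySem.List.pyGetD
        ((List.range (l.length + 1)).map (fun k => (((l.take k).count c : Int)))) (-1) 0
        = ((l.take l.length).count c : Int) := by
      rw [hrng, List.map_append]
      exact PySem.List.pyGetD_neg_one_append_singleton _ _ _
    rw [hlast]
    have hlen : (l ++ [x]).length + 1 = (l.length + 1) + 1 := by simp
    rw [hlen, show List.range (l.length + 1 + 1) = List.range (l.length + 1) ++ [l.length + 1] from
      List.range_succ, List.map_append]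
    congr 1
    · apply List.map_congr_left
      intro k hk
      have hk' : k ≤ l.length := Nat.lt_succ_iff.mp (List.mem_range.mp hk)
      rw [List.take_append_of_le_length hk']
    · simp only [List.map_cons, List.map_nil]
      rw [List.take_length, List.take_of_length_le (by simp), List.count_append]
      by_cases h : x = c
      · subst h; simp
      · simp [h]
lemma prefs_getD (chars : List Char) (c : Char) (hc : c ∈ PySem.List.dedup chars) :
    ((PySem.List.dedup chars).foldl (fun d c => d.insert c (prefixCounts chars c))
        PySem.Dict.empty).getD c [] = prefixCounts chars c := by
  have hitems : ((PySem.List.dedup chars).foldl (fun d c => d.insert c (prefixCounts chars c))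
      PySem.Dict.empty).items
      = (PySem.List.dedup chars).map (fun a => (a, prefixCounts chars a)) := by
    have := PySem.Dict.items_foldl_insert_fresh (l := PySem.List.dedup chars)
      (k := fun a => a) (v := fun a => prefixCounts chars a) (d := PySem.Dict.empty)
      (by intro a _; simp) (by simp)
    simp at this; exact this
  apply PySem.Dict.getD_of_mem_items
  · rw [hitems]
    exact List.mem_map.mpr ⟨c, hc, rfl⟩
  · exact PySem.Dict.nodup_keys_foldl_insert _ _ _ (by simp [PySem.Dict.empty])
def beauty (l : List Char) : Int :=
  (PySem.List.max? (PySem.Dict.counter l).values (fun v => v)).getD 0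
  - (PySem.List.min? (PySem.Dict.counter l).values (fun v => v)).getD 0

def sumA (p l : List Char) : Int :=
  match l with
  | [] => 0
  | c :: t => beauty (p ++ [c]) + sumA (p ++ [c]) t

lemma innerA (l p : List Char) (t : Int) :
    l.foldl (fun (st : PySem.Dict Char Int × Int) c =>
        let frequency := st.1.modify c 0 (· + 1)
        (frequency,
          st.2 + ((PySem.List.max? frequency.values (fun v => v)).getD 0
                  - (PySem.List.min? frequency.values (fun v => v)).getD 0)))
      (PySem.Dict.counter p, t)
    = (PySem.Dict.counter (p ++ l), t + sumA p l) := by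
  induction l generalizing p t with
  | nil => simp [sumA]
  | cons c t' ih =>
    rw [List.foldl_cons]
    have hc : (PySem.Dict.counter p).modify c 0 (· + 1) = PySem.Dict.counter (p ++ [c]) :=
      (PySem.Dict.counter_append_singleton p c).symm
    simp only [hc]
    rw [ih (p ++ [c])]
    simp [sumA, beauty, List.append_assoc, add_assoc]
lemma sumA_eq (l p : List Char) :
    sumA p l = ((List.range l.length).map (fun k => beauty (p ++ l.take (k + 1)))).sum := by
  induction l generalizing p with
  | nil => simp [sumA]
  | cons c t ih =>
    rw [show sumA p (c :: t) = beauty (p ++ [c]) + sumA (p ++ [c]) t from rfl, ih (p ++ [c])]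
    rw [List.length_cons, List.range_succ_eq_map, List.map_cons, List.sum_cons, List.map_map]
    simp [Function.comp_def]
lemma values_counter (l : List Char) :
    (PySem.Dict.counter l).values = (PySem.Set.ofList l).map (fun c => ((l.count c : Int))) := by
  show ((PySem.Dict.counter l).items.map Prod.snd) = _
  rw [PySem.Dict.items_counter, List.map_map]
  rfl

lemma termB_eq (chars : List Char) (i k : Nat) (hik : i + k < chars.length) :
    (let counts := ((PySem.List.dedup chars).filter (fun c =>
        ((chars.take i).count c : Int) < ((chars.take (i + 1 + k)).count c : Int))).map
      (fun c => ((chars.take (i + 1 + k)).count c : Int) - ((chars.take i).count c : Int))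
     (PySem.List.max? counts (fun v => v)).getD 0
       - (PySem.List.min? counts (fun v => v)).getD 0)
    = beauty ((chars.drop i).take (k + 1)) := by
  have hsplit : chars.take (i + 1 + k) = chars.take i ++ (chars.drop i).take (k + 1) := by
    rw [show i + 1 + k = i + (k + 1) by omega, List.take_add]
  set sub := (chars.drop i).take (k + 1) with hsub
  have hcnt : ∀ c : Char, (chars.take (i + 1 + k)).count c
      = (chars.take i).count c + sub.count c := by
    intro c; rw [hsplit, List.count_append]
  have hsubne : sub ≠ [] := by
    have : 0 < sub.length := by
      rw [hsub, List.length_take, List.length_drop]; omega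
    exact List.ne_nil_of_length_pos this
  have hsubsub : ∀ c : Char, c ∈ sub → c ∈ chars := by
    intro c hcmem
    exact List.drop_subset _ _ (List.take_subset _ _ hcmem)
  have hmem : ∀ x : Int,
      (x ∈ ((PySem.List.dedup chars).filter (fun c =>
        decide (((chars.take i).count c : Int) < ((chars.take (i + 1 + k)).count c : Int)))).map
        (fun c => ((chars.take (i + 1 + k)).count c : Int) - ((chars.take i).count c : Int)))
      ↔ x ∈ (PySem.Dict.counter sub).values := by
    intro x
    rw [values_counter]
    simp only [List.mem_map, List.mem_filter, PySem.List.mem_dedup, PySem.Set.mem_ofList]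
    constructor
    · rintro ⟨c, ⟨hmemc, hlt⟩, rfl⟩
      have hpos : 0 < sub.count c := by
        have := hcnt c
        simp only [decide_eq_true_eq] at hlt
        omega
      refine ⟨c, List.count_pos_iff.mp hpos, ?_⟩
      rw [hcnt c]; push_cast; ring
    · rintro ⟨c, hcmem, rfl⟩
      have hpos : 0 < sub.count c := List.count_pos_iff.mpr hcmem
      refine ⟨c, ⟨hsubsub c hcmem, by simp only [decide_eq_true_eq]; rw [hcnt c]; push_cast; omega⟩, ?_⟩
      rw [hcnt c]; push_cast; ring
  have hne : (((PySem.List.dedup chars).filter (fun c =>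
        decide (((chars.take i).count c : Int) < ((chars.take (i + 1 + k)).count c : Int)))).map
        (fun c => ((chars.take (i + 1 + k)).count c : Int) - ((chars.take i).count c : Int))) ≠ [] := by
    obtain ⟨c, hcmem⟩ : ∃ c, c ∈ sub := List.exists_mem_of_ne_nil sub hsubne
    intro hcontra
    have : ((sub.count c : Int)) ∈ (PySem.Dict.counter sub).values := by
      rw [values_counter]
      exact List.mem_map.mpr ⟨c, (PySem.Set.mem_ofList sub c).mpr hcmem, rfl⟩
    rw [← hmem] at this
    rw [hcontra] at this
    exact absurd this (List.not_mem_nil)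
  show _ - _ = _
  rw [beauty]
  congr 1
  · exact maxD_congr _ _ hmem hne
  · exact minD_congr _ _ hmem hne

-- ===== VERDICT (by name: the statement is the Claim_ definition above) =====
lemma Aside (s : String) : advanced_beautySum s
    = ((PySem.List.pyRange 0 (s.toList.length : Int) 1).map
        (fun i => sumA [] (s.toList.drop i.toNat))).sum := by
  unfold advanced_beautySum
  rw [PySem.List.foldl_congr_mem _ _ (fun tb i => tb + sumA [] (s.toList.drop i.toNat)) 0 ?_]
  · rw [PySem.List.foldl_add]; simp
  · intro acc i hi
    have h0i : 0 ≤ i := by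
      have := (PySem.List.mem_pyRange_one (a := 0) (b := (s.toList.length : Int)) (x := i)).mp hi
      omega
    rw [PySem.List.foldl_pyRange_pyGetD' s.toList ' '
      (fun (st : PySem.Dict Char Int × Int) c =>
        let frequency := st.1.modify c 0 (· + 1)
        (frequency,
          st.2 + ((PySem.List.max? frequency.values (fun v => v)).getD 0
                  - (PySem.List.min? frequency.values (fun v => v)).getD 0)))
      (PySem.Dict.empty, acc) h0i]
    rw [show (PySem.Dict.empty : PySem.Dict Char Int) = PySem.Dict.counter [] from rfl]
    rw [innerA]

def bterm (chars : List Char) (i j : Int) : Int :=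
  let alphabet := PySem.List.dedup chars
  let prefs : PySem.Dict Char (List Int) :=
    alphabet.foldl (fun d c => d.insert c (prefixCounts chars c)) PySem.Dict.empty
  let counts :=
    (alphabet.filter (fun c =>
        PySem.List.pyGetD (prefs.getD c []) i 0 < PySem.List.pyGetD (prefs.getD c []) j 0)).map
      (fun c =>
        PySem.List.pyGetD (prefs.getD c []) j 0 - PySem.List.pyGetD (prefs.getD c []) i 0)
  (PySem.List.max? counts (fun v => v)).getD 0 - (PySem.List.min? counts (fun v => v)).getD 0

lemma Bside (s : String) : advanced_beautySum_alt s
    = ((PySem.List.pyRange 0 (s.toList.length : Int) 1).map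
        (fun i => ((PySem.List.pyRange (i + 1) ((s.toList.length : Int) + 1) 1).map
          (fun j => bterm s.toList i j)).sum)).sum := by
  unfold advanced_beautySum_alt
  rw [PySem.List.foldl_congr_mem _ _ (fun total i =>
      total + ((PySem.List.pyRange (i + 1) ((s.toList.length : Int) + 1) 1).map
        (fun j => bterm s.toList i j)).sum) 0 ?_]
  · rw [PySem.List.foldl_add]; simp
  · intro acc i _
    rw [PySem.List.foldl_congr_mem _ _ (fun total j => total + bterm s.toList i j) acc
      (by intro a j _; rfl)]
    rw [PySem.List.foldl_add]

lemma bterm_eq (chars : List Char) (i k : Nat) (hik : i + k < chars.length) :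
    bterm chars (i : Int) ((i : Int) + 1 + (k : Int)) = beauty ((chars.drop i).take (k + 1)) := by
  have hGet : ∀ (m : Nat), m < chars.length + 1 → ∀ c ∈ PySem.List.dedup chars,
      PySem.List.pyGetD (((PySem.List.dedup chars).foldl
          (fun d c => d.insert c (prefixCounts chars c)) PySem.Dict.empty).getD c []) (m : Int) 0
        = ((chars.take m).count c : Int) := by
    intro m hm c hc
    rw [prefs_getD chars c hc, prefixCounts_eq, PySem.List.pyGetD_natCast,
      PySem.List.getD_map_range _ _ _ _ hm]
  have hj : (i : Int) + 1 + (k : Int) = ((i + 1 + k : Nat) : Int) := by push_cast; ring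
  simp only [bterm]
  rw [hj]
  rw [List.filter_congr (q := fun c =>
      decide (((chars.take i).count c : Int) < ((chars.take (i + 1 + k)).count c : Int)))
    (by intro c hc
        rw [hGet i (by omega) c hc, hGet (i + 1 + k) (by omega) c hc])]
  rw [List.map_congr_left (g := fun c =>
      ((chars.take (i + 1 + k)).count c : Int) - ((chars.take i).count c : Int))
    (by intro c hc
        have hc' := (List.mem_filter.mp hc).1
        rw [hGet i (by omega) c hc', hGet (i + 1 + k) (by omega) c hc'])]
  exact termB_eq chars i k hik

theorem advanced_beautySum_spec : Claim_equal_advanced_beautySum := by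
  intro s _
  show advanced_beautySum s = advanced_beautySum_alt s
  rw [Aside, Bside]
  apply congrArg List.sum
  apply List.map_congr_left
  intro i hi
  have hi' := (PySem.List.mem_pyRange_one (a := 0) (b := (s.toList.length : Int)) (x := i)).mp hi
  have h0i : 0 ≤ i := hi'.1
  have hin : i < (s.toList.length : Int) := hi'.2
  rw [show i = (i.toNat : Int) from (Int.toNat_of_nonneg h0i).symm]
  rw [sumA_eq]
  simp only [Int.toNat_natCast]
  simp only [List.nil_append]
  rw [PySem.List.pyRange_one ((i.toNat : Int) + 1) ((s.toList.length : Int) + 1), List.map_map]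
  have hlen : (((s.toList.length : Int) + 1) - ((i.toNat : Int) + 1)).toNat
      = s.toList.length - i.toNat := by omega
  rw [hlen]
  have hdlen : (s.toList.drop i.toNat).length = s.toList.length - i.toNat := by
    rw [List.length_drop]
  rw [hdlen]
  apply congrArg List.sum
  apply List.map_congr_left
  intro k hk
  have hk' : i.toNat + k < s.toList.length := by
    have := List.mem_range.mp hk
    omega
  exact (bterm_eq s.toList i.toNat k hk').symm
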